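-- pv_equiv track=rewrite | github.com/kristbaum/arthistorical-semantic-data-extraction | pipe_to_wikitable.py | process
-- ===== SOURCE A (Python) =====
-- def lines_to_wikitable(pipe_lines: list[str]) -> str:
--     """Convert a list of pipe-separated strings to a MediaWiki wikitable block."""
--     rows = []
--     for line in pipe_lines:
--         cols = [c.strip() for c in line.split('|')]
--         rows.append(cols)
--
--     max_cols = max(len(r) for r in rows)
--
--     parts = ['{| class="wikitable"']
--     for row in rows:
--         while len(row) < max_cols:
--             row.append('')
--         parts.append('|-')
--         parts.append('| ' + ' || '.join(row))
--     parts.append('|}')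
--     return '\n'.join(parts)
--
-- def process(text: str) -> str:
--     """Process wiki text, converting pipe-line groups to wikitables."""
--     lines = text.splitlines()
--     output: list[str] = []
--     i = 0
--
--     while i < len(lines):
--         line = lines[i]
--
--         if '|' in line:
--             # Collect consecutive pipe-lines, skipping blank-line gaps between them
--             group = [line]
--             j = i + 1
--             while j < len(lines):
--                 if '|' in lines[j]:
--                     group.append(lines[j])
--                     j += 1
--                 elif lines[j].strip() == '':
--                     # Peek ahead: continue group only if the next non-blank line also has |
--                     k = j + 1
--                     while k < len(lines) and lines[k].strip() == '':
--                         k += 1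
--                     if k < len(lines) and '|' in lines[k]:
--                         j = k  # skip blanks, land on next pipe-line
--                     else:
--                         break
--                 else:
--                     break  # non-blank, non-pipe line ends the group
--
--             output.append(lines_to_wikitable(group))
--             i = j
--         else:
--             output.append(line)
--             i += 1
--
--     return '\n'.join(output)
-- ===== SOURCE B (Python) =====
-- def lines_to_wikitable(pipe_lines: list[str]) -> str:
--     """Convert a list of pipe-separated strings to a MediaWiki wikitable block."""
--     rows = []
--     for line in pipe_lines:
--         cols = [c.strip() for c in line.split('|')]
--         rows.append(cols)
--
--     max_cols = max(len(r) for r in rows)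
--
--     parts = ['{| class="wikitable"']
--     for row in rows:
--         while len(row) < max_cols:
--             row.append('')
--         parts.append('|-')
--         parts.append('| ' + ' || '.join(row))
--     parts.append('|}')
--     return '\n'.join(parts)
--
-- def process(text: str) -> str:
--     """Single forward pass: buffer the open pipe-group and the blank lines seen
--     since its last pipe-line; blanks bridged to another pipe-line are dropped,
--     blanks that end the group are emitted after its table."""
--     output: list[str] = []
--     group: list[str] = []
--     pending: list[str] = []
--     for line in text.splitlines():
--         if '|' in line:
--             pending = []
--             group.append(line)
--         elif line.strip() == '':
--             if group:
--                 pending.append(line)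
--             else:
--                 output.append(line)
--         else:
--             if group:
--                 output.append(lines_to_wikitable(group))
--                 group = []
--             output.extend(pending)
--             pending = []
--             output.append(line)
--     if group:
--         output.append(lines_to_wikitable(group))
--         output.extend(pending)
--     return '\n'.join(output)
-- ===== Notes on version B (the rewrite author's own statement) =====
-- stated objective: alternative
-- what changed: Replaces A's index-based outer loop with nested inner while-loops that look ahead past blank runs by a single forward pass over the lines maintaining two buffers (the open pipe-group and the pending blank lines), with no lookahead.
import Mathlib
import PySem

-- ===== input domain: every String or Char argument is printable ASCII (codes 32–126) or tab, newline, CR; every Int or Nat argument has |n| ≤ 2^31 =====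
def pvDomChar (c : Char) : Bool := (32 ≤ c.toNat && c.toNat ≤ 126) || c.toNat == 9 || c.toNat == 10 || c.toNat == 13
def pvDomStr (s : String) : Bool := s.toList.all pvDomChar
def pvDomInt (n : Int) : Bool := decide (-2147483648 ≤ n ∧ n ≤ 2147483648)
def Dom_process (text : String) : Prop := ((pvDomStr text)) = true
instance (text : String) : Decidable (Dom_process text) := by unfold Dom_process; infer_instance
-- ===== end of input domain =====

-- B replaces A's index-based outer loop with lookahead scans by a single forward
-- pass keeping two buffers (open pipe-group, pending blank lines); same cost, different decomposition.


-- ===== PORT A =====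
-- '|' in line
def pvHasPipe (s : String) : Bool := PySem.Str.isIn "|" s
-- line.strip() == ''
def pvIsBlank (s : String) : Bool := PySem.Str.strip s == ""

-- lines_to_wikitable (shared verbatim by A and B; B keeps this helper unchanged)
def linesToWikitable (pipeLines : List String) : String :=
  let rows := pipeLines.map (fun line => ((PySem.Str.split? line "|").getD []).map PySem.Str.strip)
  -- max(len(r) for r in rows): rows is nonempty at every call site (group ≠ []),
  -- and each row has ≥ 1 column, so the foldl-max with seed 0 is Python's max
  let maxCols := rows.foldl (fun m r => max m r.length) 0
  let parts := ["{| class=\"wikitable\""]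
    ++ rows.flatMap (fun row =>
         ["|-", "| " ++ PySem.Str.join " || " (row ++ List.replicate (maxCols - row.length) "")])
    ++ ["|}"]
  PySem.Str.join "\n" parts

-- A's inner while (j loop): collect consecutive pipe-lines, bridging blank runs
-- whose next non-blank line also contains '|'; returns (group, remaining lines)
def collectA : List String → List String → List String × List String
  | group, [] => (group, [])
  | group, x :: xs =>
    if pvHasPipe x then collectA (group ++ [x]) xs
    else if pvIsBlank x then
      -- k-loop: skip the blank run, peek at the first non-blank line
      if (xs.dropWhile pvIsBlank) ≠ [] ∧ pvHasPipe (xs.dropWhile pvIsBlank).headI = true then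
        collectA group (xs.dropWhile pvIsBlank)
      else (group, x :: xs)
    else (group, x :: xs)
termination_by _ rest => rest.length
decreasing_by
  all_goals simp
  all_goals (have := List.length_dropWhile_le pvIsBlank xs; omega)

-- one-step unfolding equations for collectA (its WF-recursion equations do not rewrite directly)
theorem collectA_nil (group : List String) : collectA group [] = (group, []) := by
  rw [collectA.eq_def]

theorem collectA_cons (group : List String) (x : String) (xs : List String) :
    collectA group (x :: xs) =
      if pvHasPipe x then collectA (group ++ [x]) xs
      else if pvIsBlank x then
        if (xs.dropWhile pvIsBlank) ≠ [] ∧ pvHasPipe (xs.dropWhile pvIsBlank).headI = true then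
          collectA group (xs.dropWhile pvIsBlank)
        else (group, x :: xs)
      else (group, x :: xs) := by
  rw [collectA.eq_def]

theorem collectA_snd_le_aux : ∀ n : Nat, ∀ group rest : List String, rest.length ≤ n →
    (collectA group rest).2.length ≤ rest.length := by
  intro n
  induction n with
  | zero =>
      intro group rest hlen
      have : rest = [] := List.eq_nil_of_length_eq_zero (Nat.le_zero.mp hlen)
      subst this; simp [collectA_nil]
  | succ n ih =>
      intro group rest hlen
      cases rest with
      | nil => simp [collectA_nil]
      | cons x xs =>
          have hx : xs.length ≤ n := by simpa using hlen
          rw [collectA_cons]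
          split_ifs with h1 h2 h3
          · exact le_trans (ih _ xs hx) (by simp)
          · have hd := List.length_dropWhile_le pvIsBlank xs
            exact le_trans (le_trans (ih _ _ (le_trans hd hx)) hd) (by simp)
          · simp
          · simp

theorem collectA_snd_length_le (group rest : List String) :
    (collectA group rest).2.length ≤ rest.length :=
  collectA_snd_le_aux rest.length group rest (le_refl _)

-- A's outer while over i
def processLinesA : List String → List String
  | [] => []
  | l :: rest =>
    if pvHasPipe l then
      linesToWikitable (collectA [l] rest).1 :: processLinesA (collectA [l] rest).2
    else
      l :: processLinesA rest
termination_by lines => lines.length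
decreasing_by
  · have := collectA_snd_length_le [l] rest; simp; omega
  · simp

def process (text : String) : String :=
  PySem.Str.join "\n" (processLinesA (PySem.Str.splitlines text))

-- ===== PORT B =====
-- B's single forward pass: out = emitted lines, group = open pipe-group,
-- pending = blank lines seen since the group's last pipe-line
def loopB : List String → List String → List String → List String → List String
  | out, group, pending, [] =>
      if group.isEmpty then out else out ++ [linesToWikitable group] ++ pending
  | out, group, pending, l :: rest =>
      if pvHasPipe l then loopB out (group ++ [l]) [] rest
      else if pvIsBlank l then
        if group.isEmpty then loopB (out ++ [l]) group pending rest
        else loopB out group (pending ++ [l]) rest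
      else
        loopB ((if group.isEmpty then out else out ++ [linesToWikitable group]) ++ pending ++ [l])
          [] [] rest

def process_alt (text : String) : String :=
  PySem.Str.join "\n" (loopB [] [] [] (PySem.Str.splitlines text))

-- ===== PRECONDITION & SPEC =====
def Spec_process (text : String) (out : String) : Prop := out = process_alt text
instance (text : String) (out : String) : Decidable (Spec_process text out) := by unfold Spec_process; infer_instance

-- ===== CLAIM (what is proved, stated in full; the proofs are below) =====
def Claim_equal_process : Prop := ∀ (text : String), Dom_process text → Spec_process text (process text)

-- ===== LEMMAS AND PROOFS =====

theorem processLinesA_nil : processLinesA [] = [] := by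
  rw [processLinesA.eq_def]

-- a line containing '|' is not blank
theorem blank_no_pipe (s : String) (h : pvIsBlank s = true) : pvHasPipe s = false := by
  by_contra hp
  rw [Bool.not_eq_false] at hp
  have hmem : '|' ∈ s.toList := by
    have := (PySem.Str.isIn_iff_infix (sub := "|") (s := s)).mp hp
    exact this.mem (by simp)
  have hstrip : PySem.Chars.strip s.toList = [] := by
    have he : PySem.Str.strip s = "" := by
      simpa [pvIsBlank] using h
    have := congrArg String.toList he
    simpa [PySem.Str.toList_strip] using this
  -- strip = [] forces every char of s to be whitespace
  have hall : ∀ c ∈ s.toList, PySem.Chars.isspace c = true := by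
    intro c hc
    have hsplit := List.takeWhile_append_dropWhile (p := PySem.Chars.isspace) (l := s.toList)
    rw [← hsplit] at hc
    rcases List.mem_append.mp hc with h1 | h2
    · exact List.mem_takeWhile_imp h1
    · have h0 : PySem.Chars.rstrip (PySem.Chars.lstrip s.toList) = [] := hstrip
      have h3 : (PySem.Chars.lstrip s.toList).reverse.dropWhile PySem.Chars.isspace = [] := by
        simpa [PySem.Chars.rstrip] using congrArg List.reverse h0
      have h4 := (List.dropWhile_eq_nil_iff).mp h3
      exact h4 c (by simpa [PySem.Chars.lstrip] using List.mem_reverse.mpr h2)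
  have := hall '|' hmem
  simp [PySem.Chars.isspace] at this

theorem dropWhile_blanks (bs : List String) (h : ∀ b ∈ bs, pvIsBlank b = true)
    (l : String) (rest : List String) (hl : pvIsBlank l = false) :
    (bs ++ l :: rest).dropWhile pvIsBlank = l :: rest := by
  induction bs with
  | nil => simp [hl]
  | cons b bs ih =>
      simp only [List.cons_append, List.dropWhile_cons, h b (by simp)]
      exact ih (fun b' hb' => h b' (by simp [hb']))

-- collectA on an all-blank suffix stops immediately
theorem collectA_blanks (group pending : List String)
    (h : ∀ b ∈ pending, pvIsBlank b = true) : collectA group pending = (group, pending) := by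
  cases pending with
  | nil => rw [collectA_nil]
  | cons b bs =>
      have hb : pvIsBlank b = true := h b (by simp)
      have hnp : pvHasPipe b = false := blank_no_pipe b hb
      have hd : bs.dropWhile pvIsBlank = [] :=
        List.dropWhile_eq_nil_iff.mpr (fun x hx => h x (by simp [hx]))
      rw [collectA_cons]; simp [hnp, hb, hd]

-- blank lines pass through A's outer loop unchanged
theorem processA_blank_prefix (pending rest : List String)
    (h : ∀ b ∈ pending, pvIsBlank b = true) :
    processLinesA (pending ++ rest) = pending ++ processLinesA rest := by
  induction pending with
  | nil => rfl
  | cons b bs ih =>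
      have hnp : pvHasPipe b = false := blank_no_pipe b (h b (by simp))
      rw [List.cons_append, processLinesA]
      simp only [hnp, Bool.false_eq_true, if_false, List.cons_append]
      rw [ih (fun x hx => h x (by simp [hx]))]

-- a blank run bridged to a pipe-line is skipped by collectA
theorem collectA_skip (group pending : List String) (h : ∀ b ∈ pending, pvIsBlank b = true)
    (l : String) (hl : pvHasPipe l = true) (rest : List String) :
    collectA group (pending ++ l :: rest) = collectA (group ++ [l]) rest := by
  cases pending with
  | nil => rw [List.nil_append, collectA_cons]; simp [hl]
  | cons b bs =>
      have hb : pvIsBlank b = true := h b (by simp)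
      have hnp : pvHasPipe b = false := blank_no_pipe b hb
      have hlb : pvIsBlank l = false := by
        by_contra hc
        rw [Bool.not_eq_false] at hc
        rw [blank_no_pipe l hc] at hl; exact Bool.false_ne_true hl
      have hd : (bs ++ l :: rest).dropWhile pvIsBlank = l :: rest :=
        dropWhile_blanks bs (fun x hx => h x (by simp [hx])) l rest hlb
      rw [List.cons_append, collectA_cons]
      simp only [hnp, Bool.false_eq_true, if_false, hb, if_true, hd]
      simp only [List.headI, ne_eq, reduceCtorEq, not_false_eq_true, hl, and_self, if_true]
      rw [collectA_cons]; simp [hl]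

-- a blank run followed by a non-pipe line (or end of input) ends the group
theorem collectA_stop (group pending : List String) (h : ∀ b ∈ pending, pvIsBlank b = true)
    (l : String) (hl : pvHasPipe l = false) (hlb : pvIsBlank l = false) (rest : List String) :
    collectA group (pending ++ l :: rest) = (group, pending ++ l :: rest) := by
  cases pending with
  | nil => rw [List.nil_append, collectA_cons]; simp [hl, hlb]
  | cons b bs =>
      have hb : pvIsBlank b = true := h b (by simp)
      have hnp : pvHasPipe b = false := blank_no_pipe b hb
      have hd : (bs ++ l :: rest).dropWhile pvIsBlank = l :: rest :=
        dropWhile_blanks bs (fun x hx => h x (by simp [hx])) l rest hlb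
      rw [List.cons_append, collectA_cons]
      simp [hnp, hb, hd, hl]

-- the joint loop invariant, by strong induction on the number of remaining lines
theorem loopB_main : ∀ n : Nat,
    (∀ lines : List String, lines.length ≤ n → ∀ out,
      loopB out [] [] lines = out ++ processLinesA lines) ∧
    (∀ lines : List String, lines.length ≤ n → ∀ out group pending, group ≠ [] →
      (∀ b ∈ pending, pvIsBlank b = true) →
      loopB out group pending lines =
        out ++ linesToWikitable (collectA group (pending ++ lines)).1 ::
          processLinesA (collectA group (pending ++ lines)).2) := by
  intro n
  induction n with
  | zero =>
      constructor
      · intro lines hlen out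
        have : lines = [] := List.eq_nil_of_length_eq_zero (Nat.le_zero.mp hlen)
        subst this; simp [loopB, processLinesA]
      · intro lines hlen out group pending hg hp
        have : lines = [] := List.eq_nil_of_length_eq_zero (Nat.le_zero.mp hlen)
        subst this
        rw [List.append_nil, collectA_blanks group pending hp]
        have hge : group.isEmpty = false := by simpa [List.isEmpty_iff] using hg
        have hpp : processLinesA pending = pending := by
          have h0 := processA_blank_prefix pending [] hp
          rw [processLinesA_nil] at h0
          simpa using h0
        simp [loopB, hge, hpp]
  | succ n ih =>
      constructor
      · intro lines hlen out
        cases lines with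
        | nil => simp [loopB, processLinesA]
        | cons l rest =>
            have hr : rest.length ≤ n := by simpa using hlen
            by_cases hpipe : pvHasPipe l = true
            · rw [loopB]
              simp only [hpipe, if_true, List.nil_append]
              rw [ih.2 rest hr out [l] [] (by simp) (by simp)]
              rw [processLinesA]; simp [hpipe]
            · rw [Bool.not_eq_true] at hpipe
              by_cases hbl : pvIsBlank l = true
              · rw [loopB]
                simp only [hpipe, Bool.false_eq_true, if_false, hbl, if_true,
                  List.isEmpty_nil, List.nil_append]
                rw [ih.1 rest hr (out ++ [l])]
                rw [processLinesA]; simp [hpipe]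
              · rw [Bool.not_eq_true] at hbl
                rw [loopB]
                simp only [hpipe, Bool.false_eq_true, if_false, hbl, List.isEmpty_nil,
                  if_true, List.nil_append, List.append_nil]
                rw [ih.1 rest hr (out ++ [l])]
                rw [processLinesA]; simp [hpipe]
      · intro lines hlen out group pending hg hp
        have hge : group.isEmpty = false := by simpa [List.isEmpty_iff] using hg
        cases lines with
        | nil =>
            rw [List.append_nil, collectA_blanks group pending hp]
            have hpp : processLinesA pending = pending := by
              have h0 := processA_blank_prefix pending [] hp
              rw [processLinesA_nil] at h0
              simpa using h0
            simp [loopB, hge, hpp]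
        | cons l rest =>
            have hr : rest.length ≤ n := by simpa using hlen
            by_cases hpipe : pvHasPipe l = true
            · rw [loopB]
              simp only [hpipe, if_true]
              rw [ih.2 rest hr out (group ++ [l]) [] (by simp) (by simp)]
              rw [collectA_skip group pending hp l hpipe rest]
              simp
            · rw [Bool.not_eq_true] at hpipe
              by_cases hbl : pvIsBlank l = true
              · rw [loopB]
                simp only [hpipe, Bool.false_eq_true, if_false, hbl, if_true, hge]
                have hp' : ∀ b ∈ pending ++ [l], pvIsBlank b = true := by
                  intro b hb
                  rcases List.mem_append.mp hb with h1 | h2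
                  · exact hp b h1
                  · simp at h2; subst h2; exact hbl
                rw [ih.2 rest hr out group (pending ++ [l]) hg hp']
                simp
              · rw [Bool.not_eq_true] at hbl
                rw [loopB]
                simp only [hpipe, Bool.false_eq_true, if_false, hbl, hge]
                rw [ih.1 rest hr]
                rw [collectA_stop group pending hp l hpipe hbl rest]
                simp only []
                rw [processA_blank_prefix pending (l :: rest) hp]
                rw [processLinesA]
                simp [hpipe]

-- ===== VERDICT (by name: the statement is the Claim_ definition above) =====
theorem process_spec : Claim_equal_process := by
  intro text _
  unfold Spec_process process process_alt
  rw [(loopB_main (PySem.Str.splitlines text).length).1 _ (le_refl _) []]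
  rfl
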